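-- pv_equiv track=rewrite | github.com/Tracy7Lin/tech-daily-dashboard | src/tech_daily/rule_summarizer.py | pick_focus
-- ===== SOURCE A (Python) =====
-- TAG_FOCUS = {
--     "model": "模型能力升级",
--     "ai-agent": "Agent 工作流能力",
--     "developer": "开发者接入与平台能力",
--     "enterprise": "企业场景落地",
--     "customer": "客户落地与采用进展",
--     "safety": "安全、治理与可信使用",
--     "infrastructure": "算力、数据中心与基础设施",
--     "hardware": "终端与硬件入口",
--     "consumer": "面向用户的产品体验",
-- }
--
-- def pick_focus(tags: list[str], category: str) -> str:
--     ordered = ("safety", "customer", "infrastructure", "developer", "enterprise", "hardware", "model", "consumer")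
--     for tag in ordered:
--         if tag in tags:
--             return TAG_FOCUS[tag]
--     if category == "strategy":
--         return "合作方向与战略布局"
--     if category == "product":
--         return "产品更新与功能落地"
--     if category == "technology":
--         return "AI 能力与平台演进"
--     return "官方动态与后续影响"
-- ===== SOURCE B (Python) =====
-- TAG_FOCUS = {
--     "model": "模型能力升级",
--     "ai-agent": "Agent 工作流能力",
--     "developer": "开发者接入与平台能力",
--     "enterprise": "企业场景落地",
--     "customer": "客户落地与采用进展",
--     "safety": "安全、治理与可信使用",
--     "infrastructure": "算力、数据中心与基础设施",
--     "hardware": "终端与硬件入口",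
--     "consumer": "面向用户的产品体验",
-- }
--
-- _ORDERED = ("safety", "customer", "infrastructure", "developer", "enterprise", "hardware", "model", "consumer")
-- _RANK = {tag: i for i, tag in enumerate(_ORDERED)}
-- _CATEGORY_FOCUS = {
--     "strategy": "合作方向与战略布局",
--     "product": "产品更新与功能落地",
--     "technology": "AI 能力与平台演进",
-- }
--
-- def pick_focus(tags: list[str], category: str) -> str:
--     best = None  # (rank, tag) with the smallest rank seen so far
--     for t in tags:
--         r = _RANK.get(t)
--         if r is not None and (best is None or r < best[0]):
--             best = (r, t)
--     if best is not None:
--         return TAG_FOCUS[best[1]]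
--     return _CATEGORY_FOCUS.get(category, "官方动态与后续影响")
-- ===== Notes on version B (the rewrite author's own statement) =====
-- stated objective: alternative
-- what changed: B precomputes a tag->rank dict and makes a single pass over the input tags tracking the minimum-rank tag, instead of scanning the fixed priority tuple and testing membership in tags for each; the category fallback becomes a dict .get with a default.
import Mathlib
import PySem

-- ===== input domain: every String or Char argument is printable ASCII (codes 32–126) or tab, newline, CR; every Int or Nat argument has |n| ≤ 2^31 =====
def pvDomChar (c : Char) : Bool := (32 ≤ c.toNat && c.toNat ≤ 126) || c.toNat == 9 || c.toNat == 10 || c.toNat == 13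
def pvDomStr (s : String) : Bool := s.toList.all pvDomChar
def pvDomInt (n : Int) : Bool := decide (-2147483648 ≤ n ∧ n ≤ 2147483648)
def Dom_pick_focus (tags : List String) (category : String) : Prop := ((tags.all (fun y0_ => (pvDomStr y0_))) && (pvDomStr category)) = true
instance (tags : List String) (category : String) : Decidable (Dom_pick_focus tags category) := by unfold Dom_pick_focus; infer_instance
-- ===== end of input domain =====

-- B replaces A's scan of the fixed priority tuple (membership test per priority tag) by one pass
-- over the input tags tracking the minimum-rank tag via a precomputed tag→rank dict; objective: alternative.

-- ===== PORT A =====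
def TAG_FOCUS : PySem.Dict String String := PySem.Dict.ofList
  [("model", "模型能力升级"), ("ai-agent", "Agent 工作流能力"), ("developer", "开发者接入与平台能力"),
   ("enterprise", "企业场景落地"), ("customer", "客户落地与采用进展"), ("safety", "安全、治理与可信使用"),
   ("infrastructure", "算力、数据中心与基础设施"), ("hardware", "终端与硬件入口"), ("consumer", "面向用户的产品体验")]

def A_ordered : List String :=
  ["safety", "customer", "infrastructure", "developer", "enterprise", "hardware", "model", "consumer"]

-- `for tag in ordered: if tag in tags: return TAG_FOCUS[tag]`; TAG_FOCUS[tag] is only looked up at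
-- keys of TAG_FOCUS, so getD with "" is exact here.
def aLoop (tags : List String) : List String → Option String
  | [] => none
  | t :: rest => if tags.contains t then some (PySem.Dict.getD TAG_FOCUS t "") else aLoop tags rest

def pick_focus (tags : List String) (category : String) : String :=
  match aLoop tags A_ordered with
  | some s => s
  | none =>
    if category = "strategy" then "合作方向与战略布局"
    else if category = "product" then "产品更新与功能落地"
    else if category = "technology" then "AI 能力与平台演进"
    else "官方动态与后续影响"

-- ===== PORT B =====
def B_ordered : List String :=
  ["safety", "customer", "infrastructure", "developer", "enterprise", "hardware", "model", "consumer"]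

-- _RANK = {tag: i for i, tag in enumerate(_ORDERED)}
def RANK : PySem.Dict String Int :=
  PySem.Dict.ofList ((PySem.List.enumerate B_ordered).map (fun p => (p.2, p.1)))

def CATEGORY_FOCUS : PySem.Dict String String := PySem.Dict.ofList
  [("strategy", "合作方向与战略布局"), ("product", "产品更新与功能落地"), ("technology", "AI 能力与平台演进")]

-- loop body: r = _RANK.get(t); if r is not None and (best is None or r < best[0]): best = (r, t)
def bStep (acc : Option (Int × String)) (t : String) : Option (Int × String) :=
  match PySem.Dict.get? RANK t with
  | none => acc
  | some r =>
    match acc with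
    | none => some (r, t)
    | some (br, bt) => if r < br then some (r, t) else some (br, bt)

def pick_focus_alt (tags : List String) (category : String) : String :=
  match tags.foldl bStep none with
  | some (_, bt) => PySem.Dict.getD TAG_FOCUS bt ""
  | none => PySem.Dict.getD CATEGORY_FOCUS category "官方动态与后续影响"

-- ===== PRECONDITION & SPEC =====
def Spec_pick_focus (tags : List String) (category : String) (out : String) : Prop := out = pick_focus_alt tags category
instance (tags : List String) (category : String) (out : String) : Decidable (Spec_pick_focus tags category out) := by unfold Spec_pick_focus; infer_instance

-- ===== CLAIM (what is proved, stated in full; the proofs are below) =====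
def Claim_equal_pick_focus : Prop := ∀ (tags : List String) (category : String), Dom_pick_focus tags category → Spec_pick_focus tags category (pick_focus tags category)

-- ===== LEMMAS AND PROOFS =====

-- invariant of B's fold: the accumulator holds a tag of the prefix with minimal rank (or none has a rank)
def MinOK (xs : List String) (acc : Option (Int × String)) : Prop :=
  match acc with
  | none => ∀ t ∈ xs, PySem.Dict.get? RANK t = none
  | some (r, bt) => bt ∈ xs ∧ PySem.Dict.get? RANK bt = some r ∧
      ∀ t ∈ xs, ∀ rt : Int, PySem.Dict.get? RANK t = some rt → r ≤ rt

lemma fold_min : ∀ (ts xs : List String) (acc : Option (Int × String)),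
    MinOK xs acc → MinOK (xs ++ ts) (ts.foldl bStep acc) := by
  intro ts
  induction ts with
  | nil => intro xs acc h; simpa using h
  | cons t ts ih =>
    intro xs acc h
    have : xs ++ t :: ts = (xs ++ [t]) ++ ts := by simp
    rw [this, List.foldl_cons]
    apply ih
    unfold bStep
    cases hrt : PySem.Dict.get? RANK t with
    | none =>
      cases acc with
      | none =>
        intro u hu
        rcases List.mem_append.1 hu with h1 | h1
        · exact h u h1
        · simp at h1; subst h1; exact hrt
      | some p =>
        obtain ⟨br, bt⟩ := p
        obtain ⟨hm, hb, hmin⟩ := h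
        refine ⟨List.mem_append_left _ hm, hb, ?_⟩
        intro u hu ru hru
        rcases List.mem_append.1 hu with h1 | h1
        · exact hmin u h1 ru hru
        · simp at h1; subst h1; rw [hrt] at hru; exact absurd hru (by simp)
    | some r =>
      cases acc with
      | none =>
        refine ⟨by simp, hrt, ?_⟩
        intro u hu ru hru
        rcases List.mem_append.1 hu with h1 | h1
        · rw [h u h1] at hru; exact absurd hru (by simp)
        · simp at h1; subst h1; rw [hrt] at hru
          injection hru with h2; omega
      | some p =>
        obtain ⟨br, bt⟩ := p
        obtain ⟨hm, hb, hmin⟩ := h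
        by_cases hlt : r < br
        · simp only [if_pos hlt]
          refine ⟨by simp, hrt, ?_⟩
          intro u hu ru hru
          rcases List.mem_append.1 hu with h1 | h1
          · have := hmin u h1 ru hru; omega
          · simp at h1; subst h1; rw [hrt] at hru
            injection hru with h2; omega
        · simp only [if_neg hlt]
          refine ⟨List.mem_append_left _ hm, hb, ?_⟩
          intro u hu ru hru
          rcases List.mem_append.1 hu with h1 | h1
          · exact hmin u h1 ru hru
          · simp at h1; subst h1; rw [hrt] at hru
            injection hru with h2; omega

lemma rank_cases (t : String) (r : Int) (h : PySem.Dict.get? RANK t = some r) :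
    (t = "safety" ∧ r = 0) ∨ (t = "customer" ∧ r = 1) ∨ (t = "infrastructure" ∧ r = 2) ∨
    (t = "developer" ∧ r = 3) ∨ (t = "enterprise" ∧ r = 4) ∨ (t = "hardware" ∧ r = 5) ∨
    (t = "model" ∧ r = 6) ∨ (t = "consumer" ∧ r = 7) := by
  have hR : RANK = PySem.Dict.mk
      [("safety", 0), ("customer", 1), ("infrastructure", 2), ("developer", 3),
       ("enterprise", 4), ("hardware", 5), ("model", 6), ("consumer", 7)] := by decide
  rw [hR] at h
  simp only [PySem.Dict.get?_mk_cons, beq_iff_eq] at h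
  split_ifs at h <;> first | simp_all | tauto

lemma contains_false_of_min (tags : List String) (r : Int)
    (hmin : ∀ t ∈ tags, ∀ rt : Int, PySem.Dict.get? RANK t = some rt → r ≤ rt)
    (u : String) (ru : Int) (hu : PySem.Dict.get? RANK u = some ru) (hlt : ru < r) :
    u ∉ tags := by
  intro h
  have := hmin u h ru hu; omega

lemma getD_CAT (category : String) :
    PySem.Dict.getD CATEGORY_FOCUS category "官方动态与后续影响" =
      (if category = "strategy" then "合作方向与战略布局"
       else if category = "product" then "产品更新与功能落地"
       else if category = "technology" then "AI 能力与平台演进"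
       else "官方动态与后续影响") := by
  rcases eq_or_ne category "strategy" with h1 | h1
  · subst h1; rfl
  rcases eq_or_ne category "product" with h2 | h2
  · subst h2; rfl
  rcases eq_or_ne category "technology" with h3 | h3
  · subst h3; rfl
  have hC : CATEGORY_FOCUS = PySem.Dict.mk
      [("strategy", "合作方向与战略布局"), ("product", "产品更新与功能落地"), ("technology", "AI 能力与平台演进")] := by decide
  rw [hC]
  simp only [PySem.Dict.getD, PySem.Dict.get?_mk_cons, beq_iff_eq]
  rw [if_neg (Ne.symm h1), if_neg (Ne.symm h2), if_neg (Ne.symm h3), if_neg h1, if_neg h2, if_neg h3]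
  rfl

-- ===== VERDICT (by name: the statement is the Claim_ definition above) =====
theorem pick_focus_spec : Claim_equal_pick_focus := by
  intro tags category _
  unfold Spec_pick_focus
  have H : MinOK tags (tags.foldl bStep none) := by
    simpa using fold_min tags [] none (by intro t ht; simp at ht)
  unfold pick_focus pick_focus_alt
  cases hres : tags.foldl bStep none with
  | none =>
    rw [hres] at H
    have c : ∀ u r, PySem.Dict.get? RANK u = some r → u ∉ tags := by
      intro u r hu h
      rw [H u h] at hu; exact absurd hu (by simp)
    have h0 := c "safety" 0 (by decide)
    have h1 := c "customer" 1 (by decide)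
    have h2 := c "infrastructure" 2 (by decide)
    have h3 := c "developer" 3 (by decide)
    have h4 := c "enterprise" 4 (by decide)
    have h5 := c "hardware" 5 (by decide)
    have h6 := c "model" 6 (by decide)
    have h7 := c "consumer" 7 (by decide)
    simp [aLoop, A_ordered, h0, h1, h2, h3, h4, h5, h6, h7, getD_CAT]
  | some p =>
    obtain ⟨r, bt⟩ := p
    rw [hres] at H
    obtain ⟨hmem, hb, hmin⟩ := H
    rcases rank_cases bt r hb with ⟨he, hr⟩|⟨he, hr⟩|⟨he, hr⟩|⟨he, hr⟩|⟨he, hr⟩|⟨he, hr⟩|⟨he, hr⟩|⟨he, hr⟩ <;>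
      subst he <;> subst hr
    · simp [aLoop, A_ordered, hmem]
    · have h0 := contains_false_of_min tags 1 hmin "safety" 0 (by decide) (by omega)
      simp [aLoop, A_ordered, hmem, h0]
    · have h0 := contains_false_of_min tags 2 hmin "safety" 0 (by decide) (by omega)
      have h1 := contains_false_of_min tags 2 hmin "customer" 1 (by decide) (by omega)
      simp [aLoop, A_ordered, hmem, h0, h1]
    · have h0 := contains_false_of_min tags 3 hmin "safety" 0 (by decide) (by omega)
      have h1 := contains_false_of_min tags 3 hmin "customer" 1 (by decide) (by omega)
      have h2 := contains_false_of_min tags 3 hmin "infrastructure" 2 (by decide) (by omega)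
      simp [aLoop, A_ordered, hmem, h0, h1, h2]
    · have h0 := contains_false_of_min tags 4 hmin "safety" 0 (by decide) (by omega)
      have h1 := contains_false_of_min tags 4 hmin "customer" 1 (by decide) (by omega)
      have h2 := contains_false_of_min tags 4 hmin "infrastructure" 2 (by decide) (by omega)
      have h3 := contains_false_of_min tags 4 hmin "developer" 3 (by decide) (by omega)
      simp [aLoop, A_ordered, hmem, h0, h1, h2, h3]
    · have h0 := contains_false_of_min tags 5 hmin "safety" 0 (by decide) (by omega)
      have h1 := contains_false_of_min tags 5 hmin "customer" 1 (by decide) (by omega)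
      have h2 := contains_false_of_min tags 5 hmin "infrastructure" 2 (by decide) (by omega)
      have h3 := contains_false_of_min tags 5 hmin "developer" 3 (by decide) (by omega)
      have h4 := contains_false_of_min tags 5 hmin "enterprise" 4 (by decide) (by omega)
      simp [aLoop, A_ordered, hmem, h0, h1, h2, h3, h4]
    · have h0 := contains_false_of_min tags 6 hmin "safety" 0 (by decide) (by omega)
      have h1 := contains_false_of_min tags 6 hmin "customer" 1 (by decide) (by omega)
      have h2 := contains_false_of_min tags 6 hmin "infrastructure" 2 (by decide) (by omega)
      have h3 := contains_false_of_min tags 6 hmin "developer" 3 (by decide) (by omega)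
      have h4 := contains_false_of_min tags 6 hmin "enterprise" 4 (by decide) (by omega)
      have h5 := contains_false_of_min tags 6 hmin "hardware" 5 (by decide) (by omega)
      simp [aLoop, A_ordered, hmem, h0, h1, h2, h3, h4, h5]
    · have h0 := contains_false_of_min tags 7 hmin "safety" 0 (by decide) (by omega)
      have h1 := contains_false_of_min tags 7 hmin "customer" 1 (by decide) (by omega)
      have h2 := contains_false_of_min tags 7 hmin "infrastructure" 2 (by decide) (by omega)
      have h3 := contains_false_of_min tags 7 hmin "developer" 3 (by decide) (by omega)
      have h4 := contains_false_of_min tags 7 hmin "enterprise" 4 (by decide) (by omega)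
      have h5 := contains_false_of_min tags 7 hmin "hardware" 5 (by decide) (by omega)
      have h6 := contains_false_of_min tags 7 hmin "model" 6 (by decide) (by omega)
      simp [aLoop, A_ordered, hmem, h0, h1, h2, h3, h4, h5, h6]
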